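-- pv_equiv track=rewrite | github.com/duchao1123/pythonLearningProjects | day03/LearnTest1.py | fork_competition
-- ===== SOURCE A (Python) =====
-- def fork_competition(mine_com, rivals):
--     total_score = 0
--     for com in rivals:
--         if mine_com > com:
--             total_score += 3
--         elif mine_com == com:
--             total_score += 1
--     return total_score
-- ===== SOURCE B (Python) =====
-- def _bisect(srt, x, right):
--     # hand-written binary search (no imports allowed): insertion point of x in
--     # sorted list srt; leftmost if right is False, rightmost if right is True
--     lo, hi = 0, len(srt)
--     while lo < hi:
--         mid = (lo + hi) // 2
--         if srt[mid] < x or (right and srt[mid] == x):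
--             lo = mid + 1
--         else:
--             hi = mid
--     return lo
--
--
-- def fork_competition(mine_com, rivals):
--     # sort once, then locate mine_com's tie-block by two binary searches:
--     # elements before the block are strict wins (3 pts), the block itself ties (1 pt)
--     srt = sorted(rivals)
--     wins = _bisect(srt, mine_com, False)
--     ties = _bisect(srt, mine_com, True) - wins
--     return 3 * wins + ties
-- ===== Notes on version B (the rewrite author's own statement) =====
-- stated objective: alternative
-- what changed: Instead of A's fused elif-branched accumulating scan, B sorts the rivals and locates mine_com's tie-block with two hand-written binary searches (bisect-left gives the number of strict wins, bisect-right minus bisect-left the number of ties), then combines them as 3*wins + ties.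
import Mathlib
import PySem

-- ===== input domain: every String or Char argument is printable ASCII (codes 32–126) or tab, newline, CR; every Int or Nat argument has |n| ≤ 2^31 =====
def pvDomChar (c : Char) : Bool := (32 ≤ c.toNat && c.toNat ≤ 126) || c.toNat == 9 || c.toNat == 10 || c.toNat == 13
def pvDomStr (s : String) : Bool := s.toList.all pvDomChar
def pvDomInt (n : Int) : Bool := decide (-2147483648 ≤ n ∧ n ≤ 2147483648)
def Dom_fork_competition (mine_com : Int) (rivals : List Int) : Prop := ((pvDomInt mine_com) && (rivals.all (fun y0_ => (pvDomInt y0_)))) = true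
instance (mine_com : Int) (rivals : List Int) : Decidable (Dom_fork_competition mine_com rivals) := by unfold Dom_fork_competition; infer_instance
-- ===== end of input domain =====

-- B replaces A's fused elif-branched accumulating scan by sort + two hand-written
-- binary searches locating mine_com's tie-block (3*wins + ties); objective: alternative.

-- ===== PORT A =====
-- literal port of A's accumulating loop: total_score starts at 0; +3 if mine_com > com, elif +1 on tie
def fork_competition (mine_com : Int) (rivals : List Int) : Int :=
  rivals.foldl
    (fun total_score com =>
      if mine_com > com then total_score + 3
      else if mine_com == com then total_score + 1
      else total_score)
    0

-- ===== PORT B =====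
-- the while-loop of Source B's _bisect as tail recursion over the same (lo, hi) state;
-- srt[mid] is getD mid 0, exact here since the loop keeps 0 ≤ lo ≤ mid < hi ≤ len srt
def bisectLoopB (srt : List Int) (x : Int) (right : Bool) (lo hi : Nat) : Nat :=
  if h : lo < hi then
    let mid := (lo + hi) / 2
    if srt.getD mid 0 < x || (right && srt.getD mid 0 == x)
    then bisectLoopB srt x right (mid + 1) hi
    else bisectLoopB srt x right lo mid
  else lo
termination_by hi - lo
decreasing_by all_goals omega

-- Source B's _bisect(srt, x, right): lo, hi = 0, len(srt); then the loop
def bisectB (srt : List Int) (x : Int) (right : Bool) : Nat :=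
  bisectLoopB srt x right 0 srt.length

-- srt = sorted(rivals); wins = _bisect(srt, mine_com, False); ties = _bisect(srt, mine_com, True) - wins
def fork_competition_alt (mine_com : Int) (rivals : List Int) : Int :=
  let srt := PySem.List.sorted rivals (fun c => c) false
  let wins : Int := (bisectB srt mine_com false : Int)
  let ties : Int := (bisectB srt mine_com true : Int) - wins
  3 * wins + ties

-- ===== PRECONDITION & SPEC =====
def Spec_fork_competition (mine_com : Int) (rivals : List Int) (out : Int) : Prop := out = fork_competition_alt mine_com rivals
instance (mine_com : Int) (rivals : List Int) (out : Int) : Decidable (Spec_fork_competition mine_com rivals out) := by unfold Spec_fork_competition; infer_instance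

-- ===== CLAIM (what is proved, stated in full; the proofs are below) =====
def Claim_equal_fork_competition : Prop := ∀ (mine_com : Int) (rivals : List Int), Dom_fork_competition mine_com rivals → Spec_fork_competition mine_com rivals (fork_competition mine_com rivals)

-- ===== LEMMAS AND PROOFS =====

-- A's loop invariant: the fold from accumulator acc equals acc + 3*(strict wins) + ties
theorem fork_fold_eq (mine_com : Int) (rivals : List Int) (acc : Int) :
    rivals.foldl
      (fun total_score com =>
        if mine_com > com then total_score + 3
        else if mine_com == com then total_score + 1
        else total_score)
      acc
    = acc + 3 * ((rivals.countP (fun c => c < mine_com)) : Int)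
        + ((rivals.countP (fun c => c == mine_com)) : Int) := by
  induction rivals generalizing acc with
  | nil => simp
  | cons c cs ih =>
    rw [List.foldl_cons, ih]
    simp only [List.countP_cons, beq_iff_eq, decide_eq_true_eq, gt_iff_lt]
    split_ifs <;> push_cast <;> omega

-- on a sorted list, a predicate closed downward under ≤ holds exactly on the prefix of length countP
theorem prefix_iff (p : Int → Bool) (hdc : ∀ u v : Int, u ≤ v → p v = true → p u = true) :
    ∀ (a : List Int), a.Pairwise (fun u v => u ≤ v) →
      ∀ i, i < a.length → (p (a.getD i 0) = true ↔ i < a.countP p) := by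
  intro a
  induction a with
  | nil => intro _ i hi; simp at hi
  | cons c cs ih =>
    intro hp i hi
    rcases List.pairwise_cons.mp hp with ⟨h1, h2⟩
    cases i with
    | zero =>
      simp only [List.getD_cons_zero, List.countP_cons]
      constructor
      · intro hc; rw [if_pos hc]; omega
      · intro hlt
        by_contra hnc
        rw [if_neg hnc, Nat.add_zero] at hlt
        rcases List.countP_pos_iff.mp hlt with ⟨v, hv, hpv⟩
        exact hnc (hdc c v (h1 v hv) hpv)
    | succ i =>
      simp only [List.getD_cons_succ, List.countP_cons, List.length_cons] at *
      by_cases hpc : p c = true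
      · rw [if_pos hpc]
        have := ih h2 i (by omega)
        constructor
        · intro h; have := this.mp h; omega
        · intro h; exact this.mpr (by omega)
      · have hz : cs.countP p = 0 := by
          rw [List.countP_eq_zero]
          intro v hv hpv
          exact hpc (hdc c v (h1 v hv) hpv)
        have hmem : cs.getD i 0 ∈ cs := by
          have : i < cs.length := by omega
          rw [List.getD_eq_getElem cs 0 this]
          exact List.getElem_mem this
        constructor
        · intro h
          exact absurd h (List.countP_eq_zero.mp hz _ hmem)
        · intro h; rw [hz, if_neg hpc] at h; omega

-- Source B's bisect predicate is closed downward under ≤ (both flag values)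
theorem pdc (x : Int) (right : Bool) :
    ∀ u v : Int, u ≤ v → (v < x || (right && v == x)) = true →
      (u < x || (right && u == x)) = true := by
  intro u v huv hv
  cases right <;> simp_all <;> omega

-- the binary-search loop finds countP whenever countP lies in [lo, hi]
theorem loop_eq (srt : List Int) (x : Int) (right : Bool)
    (H : ∀ i, i < srt.length →
      ((srt.getD i 0 < x || (right && srt.getD i 0 == x)) = true ↔
        i < srt.countP (fun c => c < x || (right && c == x)))) :
    ∀ n lo hi, hi - lo ≤ n → hi ≤ srt.length →
      lo ≤ srt.countP (fun c => c < x || (right && c == x)) →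
      srt.countP (fun c => c < x || (right && c == x)) ≤ hi →
      bisectLoopB srt x right lo hi = srt.countP (fun c => c < x || (right && c == x)) := by
  intro n
  induction n with
  | zero =>
    intro lo hi hn hlen hlo hhi
    rw [bisectLoopB]
    rw [dif_neg (by omega)]
    omega
  | succ n ih =>
    intro lo hi hn hlen hlo hhi
    rw [bisectLoopB]
    by_cases hlh : lo < hi
    · rw [dif_pos hlh]
      have hmid : (lo + hi) / 2 < srt.length := by omega
      by_cases hc : (srt.getD ((lo + hi) / 2) 0 < x || (right && srt.getD ((lo + hi) / 2) 0 == x)) = true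
      · simp only [hc, if_true]
        have := (H _ hmid).mp hc
        exact ih ((lo + hi) / 2 + 1) hi (by omega) hlen (by omega) hhi
      · simp only [hc]
        have hk : ¬ ((lo + hi) / 2 < srt.countP (fun c => c < x || (right && c == x))) :=
          fun hlt => hc ((H _ hmid).mpr hlt)
        exact ih lo ((lo + hi) / 2) (by omega) (by omega) hlo (by omega)
    · rw [dif_neg hlh]; omega

-- Source B's _bisect on a sorted list = the count of elements satisfying its predicate
theorem bisectB_eq (srt : List Int) (x : Int) (right : Bool)
    (hs : srt.Pairwise (fun u v => u ≤ v)) :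
    bisectB srt x right = srt.countP (fun c => c < x || (right && c == x)) := by
  have H := prefix_iff (fun c => c < x || (right && c == x)) (pdc x right) srt hs
  have hle : srt.countP (fun c => c < x || (right && c == x)) ≤ srt.length :=
    List.countP_le_length
  exact loop_eq srt x right H srt.length 0 srt.length (by omega) le_rfl (by omega) hle

-- counting "< x or == x" splits into the two disjoint counts
theorem countP_le_split (x : Int) (l : List Int) :
    l.countP (fun c => c < x || c == x)
      = l.countP (fun c => c < x) + l.countP (fun c => c == x) := by
  induction l with
  | nil => simp
  | cons c cs ih =>
    simp only [List.countP_cons, ih]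
    by_cases h1 : c < x <;> by_cases h2 : c = x <;> simp [h1, h2] <;> omega

-- ===== VERDICT (by name: the statement is the Claim_ definition above) =====
theorem fork_competition_spec : Claim_equal_fork_competition := by
  intro mine_com rivals _
  unfold Spec_fork_competition fork_competition fork_competition_alt
  rw [fork_fold_eq]
  have hs := PySem.List.sorted_pairwise rivals (fun c => c)
  have hperm := PySem.List.sorted_perm rivals (fun c => c) false
  dsimp only
  rw [bisectB_eq _ _ false hs, bisectB_eq _ _ true hs]
  simp only [Bool.false_and, Bool.or_false, Bool.true_and]
  rw [countP_le_split]
  rw [hperm.countP_eq (fun c => decide (c < mine_com)),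
      hperm.countP_eq (fun c => c == mine_com)]
  push_cast
  ring
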